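-- pv_equiv track=rewrite | github.com/Yonkeiner/examen-de-lenguajes-y-compiladores | traductor.py | generar_reporte
-- ===== SOURCE A (Python) =====
-- from typing import List, Tuple, Dict
--
-- def generar_reporte(
--     traducciones: List[Tuple[str, str, int]], archivo_original: str
-- ) -> str:
--     """Genera un reporte detallado de las traducciones"""
--     if not traducciones:
--         return "No se encontraron palabras reservadas para traducir."
--
--     reporte = f"REPORTE DE ANÁLISIS - {archivo_original}\n"
--     reporte += "=" * 60 + "\n"
--     reporte += f"Total de palabras reservadas encontradas: {len(traducciones)}\n\n"
--     reporte += "DETALLE DE TRADUCCIONES:\n"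
--     reporte += "-" * 60 + "\n"
--
--     # Agrupar por línea para mejor presentación
--     traducciones_por_linea = {}
--     for original, traducida, linea in traducciones:
--         if linea not in traducciones_por_linea:
--             traducciones_por_linea[linea] = []
--         traducciones_por_linea[linea].append((original, traducida))
--
--     for linea in sorted(traducciones_por_linea.keys()):
--         reporte += f"Línea {linea}:\n"
--         for original, traducida in traducciones_por_linea[linea]:
--             reporte += f"  {original} -> {traducida}\n"
--
--     return reporte
-- ===== SOURCE B (Python) =====
-- def generar_reporte(traducciones, archivo_original):
--     """Genera un reporte detallado de las traducciones"""
--     if not traducciones: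
--         return "No se encontraron palabras reservadas para traducir."
--
--     partes = [
--         f"REPORTE DE ANÁLISIS - {archivo_original}",
--         "=" * 60,
--         f"Total de palabras reservadas encontradas: {len(traducciones)}",
--         "",
--         "DETALLE DE TRADUCCIONES:",
--         "-" * 60,
--     ]
--     for linea in sorted({l for _, _, l in traducciones}):
--         partes.append(f"Línea {linea}:")
--         for original, traducida, l in traducciones:
--             if l == linea:
--                 partes.append(f"  {original} -> {traducida}")
--     return "\n".join(partes) + "\n"
-- ===== Notes on version B (the rewrite author's own statement) =====
-- stated objective: simpler
-- what changed: Replaces A's dict-of-lists grouping index and string += accumulation by sorted distinct line numbers with a per-line filter scan, collecting lines in a list joined once at the end.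
import Mathlib
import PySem

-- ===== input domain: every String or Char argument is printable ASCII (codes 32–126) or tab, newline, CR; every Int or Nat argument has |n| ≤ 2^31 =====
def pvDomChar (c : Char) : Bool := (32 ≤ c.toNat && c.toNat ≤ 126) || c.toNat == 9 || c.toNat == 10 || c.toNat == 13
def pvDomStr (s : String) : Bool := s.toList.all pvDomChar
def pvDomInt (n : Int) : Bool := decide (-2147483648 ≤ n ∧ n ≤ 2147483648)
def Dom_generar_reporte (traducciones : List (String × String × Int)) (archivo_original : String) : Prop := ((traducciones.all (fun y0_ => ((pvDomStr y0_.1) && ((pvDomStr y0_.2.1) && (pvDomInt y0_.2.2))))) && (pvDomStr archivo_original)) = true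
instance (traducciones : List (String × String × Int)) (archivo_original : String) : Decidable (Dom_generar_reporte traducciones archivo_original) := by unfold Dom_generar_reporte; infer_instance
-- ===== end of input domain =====

-- B replaces A's dict-of-lists grouping index and `reporte +=` accumulation by
-- sorted distinct line numbers with a per-line filter pass, joining the collected
-- report lines once at the end (objective: simpler decomposition, same values).

-- ===== PORT A =====
-- the body of A's grouping loop: "if linea not in d: d[linea] = []; d[linea].append((original, traducida))"
def pvStep (d : PySem.Dict Int (List (String × String))) (p : String × String × Int) :
    PySem.Dict Int (List (String × String)) :=
  let d := if d.contains p.2.2 then d else d.insert p.2.2 []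
  d.insert p.2.2 (d.getD p.2.2 [] ++ [(p.1, p.2.1)])

def generar_reporte (traducciones : List (String × String × Int)) (archivo_original : String) : String :=
  if traducciones = [] then
    "No se encontraron palabras reservadas para traducir."
  else
    let reporte := "REPORTE DE ANÁLISIS - " ++ archivo_original ++ "\n"
    let reporte := reporte ++ String.ofList (List.replicate 60 '=') ++ "\n"
    let reporte := reporte ++ "Total de palabras reservadas encontradas: " ++ PySem.Int.toStr (traducciones.length : Int) ++ "\n\n"
    let reporte := reporte ++ "DETALLE DE TRADUCCIONES:\n"
    let reporte := reporte ++ String.ofList (List.replicate 60 '-') ++ "\n"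
    let traducciones_por_linea : PySem.Dict Int (List (String × String)) :=
      traducciones.foldl pvStep PySem.Dict.empty
    (PySem.List.sorted traducciones_por_linea.keys (fun x => x) false).foldl (fun rep linea =>
      let rep := rep ++ "Línea " ++ PySem.Int.toStr linea ++ ":\n"
      (traducciones_por_linea.getD linea []).foldl
        (fun rep q => rep ++ "  " ++ q.1 ++ " -> " ++ q.2 ++ "\n") rep) reporte

-- ===== PORT B =====
def generar_reporte_alt (traducciones : List (String × String × Int)) (archivo_original : String) : String :=
  if traducciones = [] then
    "No se encontraron palabras reservadas para traducir."
  else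
    let partes : List String :=
      [ "REPORTE DE ANÁLISIS - " ++ archivo_original,
        String.ofList (List.replicate 60 '='),
        "Total de palabras reservadas encontradas: " ++ PySem.Int.toStr (traducciones.length : Int),
        "",
        "DETALLE DE TRADUCCIONES:",
        String.ofList (List.replicate 60 '-') ]
    let partes :=
      (PySem.List.sorted (PySem.Set.ofList (traducciones.map (fun p => p.2.2))) (fun x => x) false).foldl
        (fun partes linea =>
          let partes := partes ++ ["Línea " ++ PySem.Int.toStr linea ++ ":"]
          traducciones.foldl
            (fun partes q =>
              if q.2.2 == linea then partes ++ ["  " ++ q.1 ++ " -> " ++ q.2.1] else partes)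
            partes)
        partes
    PySem.Str.join "\n" partes ++ "\n"

-- ===== PRECONDITION & SPEC =====
def Spec_generar_reporte (traducciones : List (String × String × Int)) (archivo_original : String) (out : String) : Prop := out = generar_reporte_alt traducciones archivo_original
instance (traducciones : List (String × String × Int)) (archivo_original : String) (out : String) : Decidable (Spec_generar_reporte traducciones archivo_original out) := by unfold Spec_generar_reporte; infer_instance

-- ===== CLAIM (what is proved, stated in full; the proofs are below) =====
def Claim_equal_generar_reporte : Prop := ∀ (traducciones : List (String × String × Int)) (archivo_original : String), Dom_generar_reporte traducciones archivo_original → Spec_generar_reporte traducciones archivo_original (generar_reporte traducciones archivo_original)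

-- ===== LEMMAS AND PROOFS =====

-- proof-side abbreviations for the report lines produced per translation / per line number
def pvDet (q : String × String) : String := "  " ++ q.1 ++ " -> " ++ q.2 ++ "\n"
def pvDetB (p : String × String × Int) : String := "  " ++ p.1 ++ " -> " ++ p.2.1
def pvHdrB (l : Int) : String := "Línea " ++ PySem.Int.toStr l ++ ":"
def pvBlk (tr : List (String × String × Int)) (l : Int) : List String :=
  pvHdrB l :: (tr.filter (fun q => q.2.2 == l)).map pvDetB
def pvG (D : PySem.Dict Int (List (String × String))) (l : Int) : String :=
  ("Línea " ++ PySem.Int.toStr l ++ ":\n") ++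
    String.ofList (((D.getD l []).map (fun q => (pvDet q).toList)).flatten)

theorem pvStrFoldl {α : Type} (g : α → String) (l : List α) (a : String) :
    l.foldl (fun acc x => acc ++ g x) a = a ++ String.ofList ((l.map (fun x => (g x).toList)).flatten) := by
  induction l generalizing a with
  | nil => rw [← String.toList_inj]; simp
  | cons x t ih =>
    simp only [List.foldl_cons, ih, List.map_cons, List.flatten_cons]
    rw [← String.toList_inj]; simp

-- B's nested loop appends one block of report lines per line number
theorem pvB_partes (tr : List (String × String × Int)) (lines : List Int) (partes0 : List String) :
    lines.foldl (fun partes linea =>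
        tr.foldl (fun partes q =>
            if q.2.2 == linea then partes ++ ["  " ++ q.1 ++ " -> " ++ q.2.1] else partes)
          (partes ++ ["Línea " ++ PySem.Int.toStr linea ++ ":"])) partes0
      = partes0 ++ lines.flatMap (pvBlk tr) := by
  have hbody : (fun (partes : List String) (linea : Int) =>
      tr.foldl (fun partes q =>
          if q.2.2 == linea then partes ++ ["  " ++ q.1 ++ " -> " ++ q.2.1] else partes)
        (partes ++ ["Línea " ++ PySem.Int.toStr linea ++ ":"]))
      = fun partes linea => partes ++ pvBlk tr linea := by
    funext partes linea
    rw [PySem.List.foldl_append_if (fun (q : String × String × Int) => q.2.2 == linea)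
        (fun (q : String × String × Int) => "  " ++ q.1 ++ " -> " ++ q.2.1)]
    simp [pvBlk, pvHdrB, pvDetB]
  rw [hbody, PySem.List.foldl_append_eq_flatMap]

-- A's nested loop appends pvG per line number
theorem pvA_fold (D : PySem.Dict Int (List (String × String))) (lines : List Int) (r0 : String) :
    lines.foldl (fun rep linea =>
        (D.getD linea []).foldl (fun rep q => rep ++ "  " ++ q.1 ++ " -> " ++ q.2 ++ "\n")
          (rep ++ "Línea " ++ PySem.Int.toStr linea ++ ":\n")) r0
      = r0 ++ String.ofList ((lines.map (fun l => (pvG D l).toList)).flatten) := by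
  have hbody : (fun (rep : String) (linea : Int) =>
      (D.getD linea []).foldl (fun rep q => rep ++ "  " ++ q.1 ++ " -> " ++ q.2 ++ "\n")
        (rep ++ "Línea " ++ PySem.Int.toStr linea ++ ":\n"))
      = fun rep linea => rep ++ pvG D linea := by
    funext rep linea
    have hin : (fun (rep : String) (q : String × String) => rep ++ "  " ++ q.1 ++ " -> " ++ q.2 ++ "\n")
        = fun rep q => rep ++ pvDet q := by
      funext rep q; simp [pvDet, String.append_assoc]
    rw [hin, pvStrFoldl pvDet]
    simp [pvG, String.append_assoc]
  rw [hbody, pvStrFoldl (pvG D)]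

theorem pvStep_getD (d : PySem.Dict Int (List (String × String))) (p : String × String × Int) (c : Int) :
    (pvStep d p).getD c [] =
      if c = p.2.2 then d.getD c [] ++ [(p.1, p.2.1)] else d.getD c [] := by
  unfold pvStep
  by_cases h : d.contains p.2.2
  · simp only [h, if_pos, PySem.Dict.getD_insert]
    split_ifs with hc
    · subst hc; rfl
    · rfl
  · simp only [Bool.not_eq_true] at h
    simp only [h, Bool.false_eq_true, if_false, PySem.Dict.getD_insert]
    split_ifs with hc
    · subst hc; rw [PySem.Dict.getD_of_not_contains d _ h]
    · rfl

theorem pvStep_keys (d : PySem.Dict Int (List (String × String))) (p : String × String × Int) :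
    (pvStep d p).keys = PySem.Set.add d.keys p.2.2 := by
  unfold pvStep PySem.Set.add
  have hck : PySem.Set.contains d.keys p.2.2 = d.contains p.2.2 := by
    simp only [PySem.Set.contains, PySem.Dict.contains_eq_decide_mem_keys]
    simp
  by_cases h : d.contains p.2.2
  · rw [if_pos h, PySem.Dict.keys_insert_of_contains _ _ h, hck, if_pos h]
  · simp only [Bool.not_eq_true] at h
    rw [if_neg (by simp [h]),
        PySem.Dict.keys_insert_of_contains _ _ (PySem.Dict.contains_insert_self _ _ _),
        PySem.Dict.keys_insert_of_not_contains _ _ h, hck, if_neg (by simp [h])]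

theorem pvFold_getD (xs : List (String × String × Int)) (d : PySem.Dict Int (List (String × String))) (c : Int) :
    (xs.foldl pvStep d).getD c [] =
      d.getD c [] ++ (xs.filter (fun p => p.2.2 == c)).map (fun p => (p.1, p.2.1)) := by
  induction xs generalizing d with
  | nil => simp
  | cons p t ih =>
    simp only [List.foldl_cons, ih, pvStep_getD, List.filter_cons]
    by_cases h : c = p.2.2
    · simp [h]
    · have : (p.2.2 == c) = false := by simp [beq_eq_false_iff_ne]; exact fun e => h e.symm
      simp [h, this]

theorem pvFold_keys (xs : List (String × String × Int)) (d : PySem.Dict Int (List (String × String))) :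
    (xs.foldl pvStep d).keys = PySem.Set.update d.keys (xs.map (fun p => p.2.2)) := by
  induction xs generalizing d with
  | nil => rfl
  | cons p t ih =>
    simp only [List.foldl_cons, ih, pvStep_keys, List.map_cons]
    rfl

theorem pvG_blk (tr : List (String × String × Int)) (l : Int) :
    (pvG (tr.foldl pvStep PySem.Dict.empty) l).toList
      = ((pvBlk tr l).map (fun s => s.toList ++ ['\n'])).flatten := by
  have hget : (tr.foldl pvStep PySem.Dict.empty).getD l []
      = (tr.filter (fun p => p.2.2 == l)).map (fun p => (p.1, p.2.1)) := by
    rw [pvFold_getD]; simp [PySem.Dict.getD_empty]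
  have hnl : ("\n" : String).toList = ['\n'] := rfl
  have hcl : (":\n" : String).toList = [':', '\n'] := rfl
  have hc : (":" : String).toList = [':'] := rfl
  simp only [pvG, hget, pvBlk, pvHdrB, List.map_cons, List.map_map, List.flatten_cons,
    String.toList_append, String.toList_ofList, hcl, hc]
  congr 1
  · simp [List.append_assoc]
  · congr 1
    apply List.map_congr_left
    intro p _
    simp [Function.comp, pvDet, pvDetB, String.toList_append, hnl]

theorem pvCharsJoinNl (xs : List (List Char)) (x : List Char) :
    PySem.Chars.join ['\n'] (x :: xs) ++ ['\n'] =
      ((x :: xs).map (fun s => s ++ ['\n'])).flatten := by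
  induction xs generalizing x with
  | nil => simp [PySem.Chars.join_singleton]
  | cons y t ih =>
    rw [PySem.Chars.join_cons_cons]
    simp only [List.map_cons, List.flatten_cons] at *
    rw [List.append_assoc, List.append_assoc, ih y, ← List.append_assoc]

theorem pvJoinNl (x : String) (xs : List String) :
    (PySem.Str.join "\n" (x :: xs) ++ "\n").toList =
      ((x :: xs).map (fun s => s.toList ++ ['\n'])).flatten := by
  have hnl : ("\n" : String).toList = ['\n'] := rfl
  simp only [String.toList_append, PySem.Str.toList_join, hnl, List.map_cons]
  rw [show (String.toList x :: List.map String.toList xs) = ((x :: xs).map String.toList) from rfl]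
  rw [show ((x :: xs).map String.toList) = (String.toList x :: xs.map String.toList) from rfl]
  rw [pvCharsJoinNl]
  simp [List.map_map]
  rfl

theorem pvFlattenFlatMap {α β γ : Type} (f : β → List γ) (g : α → List β) (l : List α) :
    ((l.flatMap g).map f).flatten = (l.map (fun x => ((g x).map f).flatten)).flatten := by
  induction l with
  | nil => rfl
  | cons x t ih => simp [List.flatMap_cons, List.map_append, List.flatten_append, ih]

-- ===== VERDICT (by name: the statement is the Claim_ definition above) =====
theorem generar_reporte_spec : Claim_equal_generar_reporte := by
  intro tr arch _
  unfold Spec_generar_reporte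
  by_cases h : tr = []
  · simp [generar_reporte, generar_reporte_alt, h]
  · simp only [generar_reporte, generar_reporte_alt, if_neg h]
    rw [pvA_fold, pvB_partes]
    have hkeys : (tr.foldl pvStep PySem.Dict.empty).keys
        = PySem.Set.ofList (tr.map (fun p => p.2.2)) := by
      rw [pvFold_keys]; rfl
    rw [hkeys]
    rw [← String.toList_inj]
    simp only [List.cons_append, List.nil_append]
    rw [pvJoinNl]
    have hnl : ("\n" : String).toList = ['\n'] := rfl
    have hnl2 : ("\n\n" : String).toList = ['\n', '\n'] := rfl
    have hemp : ("" : String).toList = [] := rfl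
    have hdet : ("DETALLE DE TRADUCCIONES:\n" : String).toList
        = ("DETALLE DE TRADUCCIONES:" : String).toList ++ ['\n'] := rfl
    simp only [List.map_cons, List.flatten_cons, pvFlattenFlatMap, pvG_blk,
      String.toList_append, String.toList_ofList, hnl, hnl2, hemp, hdet, List.append_assoc,
      List.nil_append, List.cons_append]
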